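-- pv_equiv track=rewrite | github.com/YunlongJiao/CodingPractice | beginner/reassign_priorities.py | reassign_priorities
-- ===== SOURCE A (Python) =====
-- def reassign_priorities(arr):
--     """
--     Given an array of task priorities represented by integers ranging from 1 to 99, reassign priorities such that:
--     after reassignment, relative ordering of two tasks with different priorities are maintained,
--     tasks sharing same priorities will still have the same priorities,
--     the top priority is reassigned to 1 and incremental between adjacent priorities is by 1.
--
--     For example, given a list of task priorities [1,3,7,3], the expected reassignment is [1,2,3,2].
--
--     This question was taken from Rafa's coding interview.
--
--     """
--
--     n = len(arr)
--     arr_sorted = sorted(arr)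
--     arr_dict = dict()
--
--     val, rank = arr_sorted[0], 1
--     for i in range(n):
--         if arr_sorted[i] != val:
--             rank += 1
--         if arr_sorted[i] not in arr_dict:
--             arr_dict[arr_sorted[i]] = rank
--         val = arr_sorted[i]
--
--     return [arr_dict[i] for i in arr]
-- ===== SOURCE B (Python) =====
-- def reassign_priorities(arr):
--     distinct = set(arr)
--     return [1 + sum(1 for v in distinct if v < x) for x in arr]
-- ===== Notes on version B (the rewrite author's own statement) =====
-- stated objective: alternative
-- what changed: Replaces sort + rank-sweep + dict with a direct comparison count: each element's new priority is 1 plus the number of distinct values below it, computed per element over the set of distinct values (no sorting, no dict).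
import Mathlib
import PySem

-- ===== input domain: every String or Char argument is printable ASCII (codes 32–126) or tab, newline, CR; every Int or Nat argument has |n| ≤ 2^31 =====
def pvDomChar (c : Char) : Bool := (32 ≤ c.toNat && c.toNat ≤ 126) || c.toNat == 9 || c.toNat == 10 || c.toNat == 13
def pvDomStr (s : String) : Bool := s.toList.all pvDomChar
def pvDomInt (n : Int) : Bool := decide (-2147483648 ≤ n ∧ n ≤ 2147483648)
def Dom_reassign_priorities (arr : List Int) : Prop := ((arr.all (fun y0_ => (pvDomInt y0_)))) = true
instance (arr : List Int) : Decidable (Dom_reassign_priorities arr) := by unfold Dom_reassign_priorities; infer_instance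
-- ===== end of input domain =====

-- B replaces A's sort + rank-sweep + dict with a direct per-element count of distinct smaller values (objective: alternative, not claimed faster).

-- ===== PORT A =====
-- one loop iteration of A: state (val, rank, arr_dict), next sorted element x
def raStep (st : Int × Int × PySem.Dict Int Int) (x : Int) : Int × Int × PySem.Dict Int Int :=
  let rank := if x ≠ st.1 then st.2.1 + 1 else st.2.1
  let d := if st.2.2.contains x then st.2.2 else st.2.2.insert x rank
  (x, rank, d)

def reassign_priorities (arr : List Int) : List Int :=
  let s := PySem.List.sorted arr (fun x => x) false
  match PySem.List.pyGet? s 0 with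
  | none => []                     -- reading the first sorted element raises IndexError here: excluded by Pre_
  | some v0 =>
    -- 'for i in range(n): … arr_sorted[i] …' = fold over arr_sorted itself
    let st := s.foldl raStep (v0, 1, PySem.Dict.empty)
    arr.map (fun x => st.2.2.getD x 0)   -- arr_dict[i]; every x ∈ arr is a key, so no KeyError

-- ===== PORT B =====
def reassign_priorities_alt (arr : List Int) : List Int :=
  let distinct := PySem.Set.ofList arr
  arr.map (fun x => 1 + (distinct.map (fun v => if v < x then (1 : Int) else 0)).sum)

-- ===== PRECONDITION & SPEC =====
-- Pre_ excludes only the empty list, on which A raises IndexError reading the first sorted element.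
def Pre_reassign_priorities (arr : List Int) : Prop := arr ≠ []
instance (arr : List Int) : Decidable (Pre_reassign_priorities arr) := by unfold Pre_reassign_priorities; infer_instance
def pvWitness_reassign_priorities : List Int := [1, 3, 7, 3]

def Spec_reassign_priorities (arr : List Int) (out : List Int) : Prop := out = reassign_priorities_alt arr
instance (arr : List Int) (out : List Int) : Decidable (Spec_reassign_priorities arr out) := by unfold Spec_reassign_priorities; infer_instance

-- ===== CLAIM (what is proved, stated in full; the proofs are below) =====
def Claim_equal_reassign_priorities : Prop := ∀ (arr : List Int), Dom_reassign_priorities arr → Pre_reassign_priorities arr → Spec_reassign_priorities arr (reassign_priorities arr)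

-- ===== LEMMAS AND PROOFS =====

-- number of distinct values of t that are ≤ x and ≠ e
def dcnt (t : List Int) (x e : Int) : Int := ((t.toFinset.filter (fun v => v ≤ x ∧ v ≠ e)).card : Int)
-- number of distinct values of t that are < x
def bcnt (t : List Int) (x : Int) : Int := ((t.toFinset.filter (fun v => v < x)).card : Int)

lemma dcnt_cons_step (x0 : Int) (t' : List Int) (x e : Int)
    (hmono : ∀ v ∈ t', x0 ≤ v) (hvx : x0 ≤ x) (he : e ≤ x0) :
    dcnt (x0 :: t') x e = (if x0 = e then 0 else 1) + dcnt t' x x0 := by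
  unfold dcnt
  rw [List.toFinset_cons, Finset.filter_insert]
  by_cases h : x0 = e
  · subst h
    rw [if_neg (by simp), if_pos rfl]
    simp
  · rw [if_pos ⟨hvx, h⟩, if_neg h]
    have hsets : insert x0 (t'.toFinset.filter (fun v => v ≤ x ∧ v ≠ e))
        = insert x0 (t'.toFinset.filter (fun v => v ≤ x ∧ v ≠ x0)) := by
      ext v
      simp only [Finset.mem_insert, Finset.mem_filter]
      by_cases hv : v = x0
      · simp [hv]
      · constructor
        · rintro (rfl | ⟨hm, h1, h2⟩)
          · exact absurd rfl hv
          · exact Or.inr ⟨hm, h1, hv⟩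
        · rintro (rfl | ⟨hm, h1, h2⟩)
          · exact absurd rfl hv
          · have hxv := hmono v (List.mem_toFinset.mp hm)
            exact Or.inr ⟨hm, h1, by omega⟩
    rw [hsets, Finset.card_insert_of_notMem (by simp)]
    push_cast
    ring

lemma dcnt_self_zero (t' : List Int) (x0 : Int) (hmono : ∀ v ∈ t', x0 ≤ v) :
    dcnt t' x0 x0 = 0 := by
  unfold dcnt
  have h : t'.toFinset.filter (fun v => v ≤ x0 ∧ v ≠ x0) = ∅ := by
    rw [Finset.filter_eq_empty_iff]
    rintro v hv ⟨h1, h2⟩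
    exact h2 (le_antisymm h1 (hmono v (List.mem_toFinset.mp hv)))
  rw [h]
  simp

lemma loop_inv (t : List Int) : ∀ (val rank : Int) (d : PySem.Dict Int Int),
    (∀ v ∈ t, val ≤ v) → t.Pairwise (· ≤ ·) →
    ∀ x : Int, (t.foldl raStep (val, rank, d)).2.2.get? x =
      if d.contains x then d.get? x
      else if x ∈ t then some (rank + dcnt t x val)
      else none := by
  induction t with
  | nil =>
    intro val rank d _ _ x
    simp only [List.foldl_nil, List.not_mem_nil, if_false]
    by_cases hc : d.contains x = true
    · simp [hc]
    · simp only [Bool.not_eq_true] at hc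
      simp [hc, PySem.Dict.get?_eq_none_iff_contains]
  | cons x0 t' ih =>
    intro val rank d hlb hpw x
    have hx0le : ∀ v ∈ t', x0 ≤ v := (List.pairwise_cons.mp hpw).1
    have hpw' : t'.Pairwise (· ≤ ·) := (List.pairwise_cons.mp hpw).2
    have hvalx0 : val ≤ x0 := hlb x0 (List.mem_cons_self)
    simp only [List.foldl_cons]
    rw [show raStep (val, rank, d) x0
        = (x0, (if x0 ≠ val then rank + 1 else rank),
           (if d.contains x0 then d else d.insert x0 (if x0 ≠ val then rank + 1 else rank))) from rfl]
    generalize hr' : (if x0 ≠ val then rank + 1 else rank) = r'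
    have hr'eq : r' = rank + (if x0 = val then 0 else 1) := by
      rw [← hr']; by_cases h : x0 = val <;> simp [h]
    rw [ih x0 r' _ hx0le hpw' x]
    by_cases hc0 : d.contains x0 = true
    · simp only [hc0, if_true]
      by_cases hdx : d.contains x = true
      · simp [hdx]
      · simp only [Bool.not_eq_true] at hdx
        have hxx0 : x ≠ x0 := fun h => by rw [h, hc0] at hdx; cases hdx
        simp only [hdx, Bool.false_eq_true, if_false]
        by_cases hxt : x ∈ t'
        · rw [if_pos hxt, if_pos (List.mem_cons_of_mem _ hxt)]
          rw [dcnt_cons_step x0 t' x val hx0le (hx0le x hxt) hvalx0, hr'eq]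
          congr 1
          ring
        · rw [if_neg hxt, if_neg (by simp [hxt, hxx0])]
    · simp only [Bool.not_eq_true] at hc0
      simp only [hc0, Bool.false_eq_true, if_false]
      by_cases hxx0 : x = x0
      · subst hxx0
        rw [if_pos (by rw [PySem.Dict.contains_insert]; simp)]
        rw [PySem.Dict.get?_insert_self]
        rw [if_neg (by simp [hc0]), if_pos (List.mem_cons_self)]
        rw [dcnt_cons_step x t' x val hx0le le_rfl hvalx0, dcnt_self_zero t' x hx0le, hr'eq]
        congr 1
        ring
      · have hcx : (d.insert x0 r').contains x = d.contains x := by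
          rw [PySem.Dict.contains_insert]
          simp [hxx0]
        rw [hcx]
        by_cases hdx : d.contains x = true
        · simp only [hdx, if_true]
          simp [PySem.Dict.get?_insert, hxx0]
        · simp only [Bool.not_eq_true] at hdx
          simp only [hdx, Bool.false_eq_true, if_false]
          by_cases hxt : x ∈ t'
          · rw [if_pos hxt, if_pos (List.mem_cons_of_mem _ hxt)]
            rw [dcnt_cons_step x0 t' x val hx0le (hx0le x hxt) hvalx0, hr'eq]
            congr 1
            ring
          · rw [if_neg hxt, if_neg (by simp [hxt, hxx0])]

lemma dcnt_eq_bcnt (t : List Int) (v0 x : Int) (hmem : v0 ∈ t) (hmin : ∀ v ∈ t, v0 ≤ v)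
    (hx : x ∈ t) : dcnt t x v0 = bcnt t x := by
  unfold dcnt bcnt
  by_cases hx0 : x = v0
  · subst hx0
    have h1 : t.toFinset.filter (fun v => v ≤ x ∧ v ≠ x) = ∅ := by
      rw [Finset.filter_eq_empty_iff]
      rintro v hv ⟨ha, hb⟩
      exact hb (le_antisymm ha (hmin v (List.mem_toFinset.mp hv)))
    have h2 : t.toFinset.filter (fun v => v < x) = ∅ := by
      rw [Finset.filter_eq_empty_iff]
      intro v hv hlt
      exact absurd (hmin v (List.mem_toFinset.mp hv)) (not_le.mpr hlt)
    rw [h1, h2]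
  · have hv0x : v0 < x := lt_of_le_of_ne (hmin x hx) (Ne.symm hx0)
    have hsets : t.toFinset.filter (fun v => v ≤ x ∧ v ≠ v0)
        = insert x ((t.toFinset.filter (fun v => v < x)).erase v0) := by
      ext v
      simp only [Finset.mem_insert, Finset.mem_erase, Finset.mem_filter]
      constructor
      · rintro ⟨hm, h1, h2⟩
        by_cases hvx : v = x
        · exact Or.inl hvx
        · exact Or.inr ⟨h2, hm, lt_of_le_of_ne h1 hvx⟩
      · rintro (rfl | ⟨h2, hm, h1⟩)
        · exact ⟨List.mem_toFinset.mpr hx, le_rfl, hx0⟩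
        · exact ⟨hm, le_of_lt h1, h2⟩
    rw [hsets]
    have hxnot : x ∉ (t.toFinset.filter (fun v => v < x)).erase v0 := by
      simp
    rw [Finset.card_insert_of_notMem hxnot]
    have hv0mem : v0 ∈ t.toFinset.filter (fun v => v < x) :=
      Finset.mem_filter.mpr ⟨List.mem_toFinset.mpr hmem, hv0x⟩
    rw [Finset.card_erase_of_mem hv0mem]
    have : 1 ≤ (t.toFinset.filter (fun v => v < x)).card :=
      Finset.card_pos.mpr ⟨v0, hv0mem⟩
    push_cast [Nat.sub_add_cancel this]
    rfl

lemma alt_eq_bcnt (arr : List Int) (x : Int) :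
    1 + ((PySem.Set.ofList arr).map (fun v => if v < x then (1 : Int) else 0)).sum = 1 + bcnt arr x := by
  have h1 : ∀ v : Int, (if v < x then (1 : Int) else 0)
      = (if (decide (v < x)) = true then 1 else 0) := by
    intro v; simp
  simp only [h1]
  rw [PySem.List.sum_map_ite_one_zero]
  have h2 : List.countP (fun v => decide (v < x)) (PySem.Set.ofList arr)
      = ((PySem.Set.ofList arr).filter (fun v => decide (v < x))).length := by
    rw [List.countP_eq_length_filter]
  have hnd : ((PySem.Set.ofList arr).filter (fun v => decide (v < x))).Nodup :=
    (PySem.Set.nodup_ofList arr).filter _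
  have h3 : ((PySem.Set.ofList arr).filter (fun v => decide (v < x))).length
      = ((PySem.Set.ofList arr).filter (fun v => decide (v < x))).toFinset.card :=
    (List.toFinset_card_of_nodup hnd).symm
  have h4 : ((PySem.Set.ofList arr).filter (fun v => decide (v < x))).toFinset
      = (PySem.Set.ofList arr).toFinset.filter (fun v => v < x) := by
    rw [List.toFinset_filter]
    simp
  have h5 : (PySem.Set.ofList arr).toFinset = arr.toFinset := by
    ext v
    simp [List.mem_toFinset, PySem.Set.mem_ofList]
  unfold bcnt
  rw [h2, h3, h4, h5]

-- ===== VERDICT (by name: the statement is the Claim_ definition above) =====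
theorem reassign_priorities_spec : Claim_equal_reassign_priorities := by
  intro arr _ hpre
  unfold Spec_reassign_priorities reassign_priorities reassign_priorities_alt
  have hs : PySem.List.sorted arr (fun x => x) false ≠ [] := fun h =>
    hpre ((PySem.List.sorted_eq_nil_iff arr _ false).mp h)
  cases hse : PySem.List.sorted arr (fun x => x) false with
  | nil => exact absurd hse hs
  | cons v0 rest =>
    have hget0 : PySem.List.pyGet? (v0 :: rest) (0 : Int) = some v0 := by
      simp [PySem.List.pyGet?, PySem.List.pyIdx?]
    show (match PySem.List.pyGet? (v0 :: rest) (0 : Int) with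
        | none => ([] : List Int)
        | some w => List.map (fun x =>
            (List.foldl raStep (w, 1, PySem.Dict.empty) (v0 :: rest)).2.2.getD x 0) arr)
      = List.map (fun x =>
          1 + (List.map (fun v => if v < x then (1 : Int) else 0) (PySem.Set.ofList arr)).sum) arr
    rw [hget0]
    apply List.map_congr_left
    intro x hx
    have hxs : x ∈ v0 :: rest := by
      rw [← hse, PySem.List.mem_sorted]; exact hx
    have hlb : ∀ v ∈ v0 :: rest, v0 ≤ v := by
      intro v hv
      exact PySem.List.key_head_sorted_le arr (fun x => x) hse v
        ((PySem.List.mem_sorted arr (fun x => x) false v).mp (hse ▸ hv))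
    have hpw : (v0 :: rest).Pairwise (· ≤ ·) := by
      have := PySem.List.sorted_pairwise arr (fun x => x)
      rw [hse] at this
      exact this
    rw [PySem.Dict.getD_eq_get?_getD,
        loop_inv (v0 :: rest) v0 1 PySem.Dict.empty hlb hpw x]
    rw [if_neg (by simp [PySem.Dict.contains_empty]), if_pos hxs]
    rw [dcnt_eq_bcnt (v0 :: rest) v0 x (List.mem_cons_self) hlb hxs]
    have hperm : (v0 :: rest).toFinset = arr.toFinset := by
      ext v
      rw [← hse]
      simp [List.mem_toFinset, PySem.List.mem_sorted]
    unfold bcnt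
    rw [hperm]
    have := alt_eq_bcnt arr x
    unfold bcnt at this
    simp only [Option.getD_some]
    omega
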